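-- pv_equiv track=rewrite | github.com/pratyush-ksingh/dsa-nova | step_16_dynamic_programming/16.8_mcm_partition/P006_partition_array_for_maximum_sum/solution.py | brute_force
-- ===== SOURCE A (Python) =====
-- from typing import List
--
-- def brute_force(arr: List[int], k: int) -> int:
--     n = len(arr)
--
--     def solve(idx: int) -> int:
--         if idx == n:
--             return 0
--         max_val = 0
--         best_sum = 0
--         for length in range(1, k + 1):
--             if idx + length > n:
--                 break
--             max_val = max(max_val, arr[idx + length - 1])
--             curr = max_val * length + solve(idx + length)
--             best_sum = max(best_sum, curr)
--         return best_sum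
--
--     return solve(0)
-- ===== SOURCE B (Python) =====
-- def brute_force(arr, k):
--     n = len(arr)
--     dp = [0]  # dp[j] holds the best sum for the suffix starting at i + 1 + j
--     for i in range(n - 1, -1, -1):
--         max_val = 0
--         best = 0
--         L = min(k, n - i)
--         for length in range(1, L + 1):
--             max_val = max(max_val, arr[i + length - 1])
--             best = max(best, max_val * length + dp[length - 1])
--         dp = [best] + dp
--     return dp[0]
-- ===== Notes on version B (the rewrite author's own statement) =====
-- stated objective: faster
-- what changed: Replaces A's exponential top-down recursion (re-solving every suffix repeatedly) with a bottom-up dynamic-programming pass that computes each suffix value once, right to left.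
import Mathlib
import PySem

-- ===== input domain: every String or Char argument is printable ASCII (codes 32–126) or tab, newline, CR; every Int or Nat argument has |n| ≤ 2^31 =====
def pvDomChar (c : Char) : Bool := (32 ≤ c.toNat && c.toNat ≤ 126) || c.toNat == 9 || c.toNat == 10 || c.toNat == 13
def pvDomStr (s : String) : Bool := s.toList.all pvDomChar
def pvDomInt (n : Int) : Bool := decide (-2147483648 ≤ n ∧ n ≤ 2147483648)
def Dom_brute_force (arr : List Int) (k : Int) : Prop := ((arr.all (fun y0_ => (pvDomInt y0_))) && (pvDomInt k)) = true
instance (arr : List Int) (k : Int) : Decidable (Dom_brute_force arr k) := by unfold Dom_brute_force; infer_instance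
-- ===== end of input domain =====

-- B replaces A's exponential top-down recursion by a bottom-up DP over suffixes (objective: faster, asymptotic).

-- ===== PORT A =====
-- A's inner 'for length in range(1, k+1)' loop with its break; 'slv' is the recursive solve.
def loopA (arr : List Int) (n k : Int) (slv : Int → Int) (idx len mv bs : Int) : Int :=
  if len > k then bs
  else if h : idx + len > n then bs
  else
    let mv' := max mv ((PySem.List.pyGet? arr (idx + len - 1)).getD 0)
    let curr := mv' * len + slv (idx + len)
    loopA arr n k slv idx (len + 1) mv' (max bs curr)
termination_by (n - idx + 1 - len).toNat
decreasing_by simp at h; omega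

-- A's solve(idx); fuel only bounds the recursion depth (n - idx), it is a totality guard.
def solveA (arr : List Int) (n k : Int) : Nat → Int → Int
  | 0, _ => 0
  | fuel + 1, idx => if idx = n then 0 else loopA arr n k (solveA arr n k fuel) idx 1 0 0

def brute_force (arr : List Int) (k : Int) : Int :=
  solveA arr (arr.length : Int) k arr.length 0

-- ===== PORT B =====
-- B's inner 'for length in range(1, L+1)' loop; dp[j] is the value of the suffix starting at i+1+j.
def innerB (arr : List Int) (i : Int) (dp : List Int) (L : Int) (len mv bs : Int) : Int :=
  if h : len > L then bs
  else
    let mv' := max mv ((PySem.List.pyGet? arr (i + len - 1)).getD 0)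
    let bs' := max bs (mv' * len + (PySem.List.pyGet? dp (len - 1)).getD 0)
    innerB arr i dp L (len + 1) mv' bs'
termination_by (L + 1 - len).toNat
decreasing_by simp at h; omega

-- one iteration of B's outer loop at i = n - m - 1
def bestAt (arr : List Int) (k : Int) (i : Int) (dp : List Int) : Int :=
  innerB arr i dp (min k ((arr.length : Int) - i)) 1 0 0

-- B's outer loop, building dp back to front; dpList m = dp after handling i = n-1 … n-m
def dpList (arr : List Int) (k : Int) : Nat → List Int
  | 0 => [0]
  | m + 1 => bestAt arr k ((arr.length : Int) - (m + 1)) (dpList arr k m) :: dpList arr k m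

def brute_force_alt (arr : List Int) (k : Int) : Int :=
  (dpList arr k arr.length).headD 0

-- ===== PRECONDITION & SPEC =====
def Spec_brute_force (arr : List Int) (k : Int) (out : Int) : Prop := out = brute_force_alt arr k
instance (arr : List Int) (k : Int) (out : Int) : Decidable (Spec_brute_force arr k out) := by unfold Spec_brute_force; infer_instance

-- ===== CLAIM (what is proved, stated in full; the proofs are below) =====
def Claim_equal_brute_force : Prop := ∀ (arr : List Int) (k : Int), Dom_brute_force arr k → Spec_brute_force arr k (brute_force arr k)

-- ===== LEMMAS AND PROOFS =====

-- loopA only depends on slv at the indices the loop actually calls it on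
theorem loopA_congr (arr : List Int) (n k : Int) (slv slv' : Int → Int) (idx : Int) :
    ∀ len mv bs, (∀ j : Int, len ≤ j → j ≤ k → idx + j ≤ n → slv (idx + j) = slv' (idx + j)) →
      loopA arr n k slv idx len mv bs = loopA arr n k slv' idx len mv bs := by
  suffices H : ∀ t : Nat, ∀ len mv bs, (n - idx + 1 - len).toNat ≤ t →
      (∀ j : Int, len ≤ j → j ≤ k → idx + j ≤ n → slv (idx + j) = slv' (idx + j)) →
      loopA arr n k slv idx len mv bs = loopA arr n k slv' idx len mv bs by
    intro len mv bs h; exact H _ len mv bs le_rfl h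
  intro t
  induction t with
  | zero =>
    intro len mv bs ht h
    conv_lhs => rw [loopA]
    conv_rhs => rw [loopA]
    split_ifs with h1 h2
    · rfl
    · rfl
    · omega
  | succ t ih =>
    intro len mv bs ht h
    conv_lhs => rw [loopA]
    conv_rhs => rw [loopA]
    split_ifs with h1 h2
    · rfl
    · rfl
    · simp only []
      rw [h len le_rfl (by omega) (by omega)]
      exact ih (len + 1) _ _ (by omega) (fun j hj hk hn => h j (by omega) hk hn)

-- solveA does not depend on the fuel once it exceeds the recursion depth
theorem solveA_fuel (arr : List Int) (n k : Int) (hn : n = (arr.length : Int)) :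
    ∀ f1 f2 : Nat, ∀ idx : Int, 0 ≤ idx → idx ≤ n →
      (n - idx).toNat ≤ f1 → (n - idx).toNat ≤ f2 →
      solveA arr n k f1 idx = solveA arr n k f2 idx := by
  intro f1
  induction f1 with
  | zero =>
    intro f2 idx h0 h1 hf1 hf2
    have : idx = n := by omega
    subst this
    cases f2 <;> simp [solveA]
  | succ f ih =>
    intro f2 idx h0 h1 hf1 hf2
    cases f2 with
    | zero =>
      have : idx = n := by omega
      subst this
      simp [solveA]
    | succ f2 =>
      by_cases hidx : idx = n
      · subst hidx; simp [solveA]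
      · simp only [solveA, if_neg hidx]
        exact loopA_congr arr n k _ _ idx 1 0 0
          (fun j hj hk hn => ih f2 (idx + j) (by omega) hn (by omega) (by omega))

-- canonical value of A's solve at idx
def sv (arr : List Int) (k : Int) (idx : Int) : Int :=
  solveA arr (arr.length : Int) k ((arr.length : Int) - idx).toNat idx

-- B's inner loop computes the same as A's inner loop once dp stores the sv values
theorem innerB_eq_loopA (arr : List Int) (k : Int) (i : Int) (dp : List Int)
    (hdp : ∀ j : Nat, j < dp.length → dp[j]? = some (sv arr k (i + 1 + j)))
    (hlen : (arr.length : Int) - i ≤ (dp.length : Int)) :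
    ∀ len mv bs, 1 ≤ len →
      innerB arr i dp (min k ((arr.length : Int) - i)) len mv bs
        = loopA arr (arr.length : Int) k (sv arr k) i len mv bs := by
  suffices H : ∀ t : Nat, ∀ len mv bs, 1 ≤ len → (min k ((arr.length : Int) - i) + 1 - len).toNat ≤ t →
      innerB arr i dp (min k ((arr.length : Int) - i)) len mv bs
        = loopA arr (arr.length : Int) k (sv arr k) i len mv bs by
    intro len mv bs h1; exact H _ len mv bs h1 le_rfl
  intro t
  induction t with
  | zero =>
    intro len mv bs h1 ht
    have g1 : len > min k ((arr.length : Int) - i) := by omega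
    conv_lhs => rw [innerB]
    rw [dif_pos g1]
    rw [loopA]
    by_cases hk : len > k
    · rw [if_pos hk]
    · rw [if_neg hk, dif_pos (by omega : i + len > (arr.length : Int))]
  | succ t ih =>
    intro len mv bs h1 ht
    by_cases g1 : len > min k ((arr.length : Int) - i)
    · conv_lhs => rw [innerB]
      rw [dif_pos g1]
      rw [loopA]
      by_cases hk : len > k
      · rw [if_pos hk]
      · rw [if_neg hk, dif_pos (by omega : i + len > (arr.length : Int))]
    · have hk : ¬ len > k := by omega
      have hn : ¬ i + len > (arr.length : Int) := by omega
      conv_lhs => rw [innerB]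
      conv_rhs => rw [loopA]
      rw [dif_neg g1, if_neg hk, dif_neg hn]
      simp only []
      have hlt : (len - 1).toNat < dp.length := by omega
      have hdpv := hdp (len - 1).toNat hlt
      have hget : (PySem.List.pyGet? dp (len - 1)).getD 0 = sv arr k (i + len) := by
        rw [PySem.List.pyGet?_of_nonneg dp (by omega : (0:Int) ≤ len - 1), hdpv]
        have heq : i + 1 + ((len - 1).toNat : Int) = i + len := by omega
        rw [heq]; rfl
      rw [hget]
      exact ih (len + 1) _ _ (by omega) (by omega)

theorem dpList_length (arr : List Int) (k : Int) : ∀ m : Nat, (dpList arr k m).length = m + 1 := by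
  intro m; induction m with
  | zero => rfl
  | succ m ih => simp [dpList, ih]

-- the dp list built by B holds exactly the sv values of the suffixes
theorem dpList_spec (arr : List Int) (k : Int) :
    ∀ m : Nat, m ≤ arr.length →
      ∀ j : Nat, j < (dpList arr k m).length →
        (dpList arr k m)[j]? = some (sv arr k ((arr.length : Int) - m + j)) := by
  intro m
  induction m with
  | zero =>
    intro _ j hj
    have hj0 : j = 0 := by simpa [dpList] using hj
    subst hj0
    have h0 : ((arr.length : Int)) - ((0:Nat) : Int) + ((0:Nat) : Int) = (arr.length : Int) := by
      push_cast; ring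
    rw [h0]
    have h1 : ((arr.length : Int) - (arr.length : Int)).toNat = 0 := by omega
    simp only [dpList, sv, h1, solveA]
    rfl
  | succ m ih =>
    intro hm j hj
    have hml : m ≤ arr.length := by omega
    have hdl : (dpList arr k m).length = m + 1 := dpList_length arr k m
    cases j with
    | succ j' =>
      have hj' : j' < (dpList arr k m).length := by
        simp [dpList] at hj; omega
      have := ih hml j' hj'
      simp only [dpList, List.getElem?_cons_succ]
      rw [this]
      congr 2
      push_cast; ring
    | zero =>
      simp only [dpList, List.getElem?_cons_zero, Option.some.injEq]
      have hbest : bestAt arr k ((arr.length : Int) - ((m:Int) + 1)) (dpList arr k m)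
          = loopA arr (arr.length : Int) k (sv arr k) ((arr.length : Int) - ((m:Int) + 1)) 1 0 0 := by
        apply innerB_eq_loopA
        · intro j hjl
          rw [ih hml j hjl]
          congr 2
          ring
        · rw [hdl]; omega
        · omega
      have hsv : sv arr k ((arr.length : Int) - ((m:Int) + 1))
          = loopA arr (arr.length : Int) k (sv arr k) ((arr.length : Int) - ((m:Int) + 1)) 1 0 0 := by
        unfold sv
        have hf : ((arr.length : Int) - ((arr.length : Int) - ((m:Int) + 1))).toNat = m + 1 := by omega
        rw [hf]
        have hne : ¬ ((arr.length : Int) - ((m:Int) + 1)) = (arr.length : Int) := by omega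
        simp only [solveA, if_neg hne]
        apply loopA_congr
        intro j hj1 hjk hjn
        exact solveA_fuel arr (arr.length : Int) k rfl m
          (((arr.length : Int) - ((arr.length : Int) - ((m:Int) + 1) + j)).toNat)
          ((arr.length : Int) - ((m:Int) + 1) + j) (by omega) (by omega) (by omega) (by omega)
      rw [hbest, ← hsv]
      congr 1
      push_cast; ring

theorem brute_force_spec : Claim_equal_brute_force := by
  intro arr k _
  unfold Spec_brute_force brute_force brute_force_alt
  have hA : solveA arr (arr.length : Int) k arr.length 0 = sv arr k 0 := by
    unfold sv
    exact solveA_fuel arr (arr.length : Int) k rfl arr.length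
      ((arr.length : Int) - 0).toNat 0 le_rfl (by omega) (by omega) (by omega)
  have h0 := dpList_spec arr k arr.length le_rfl 0 (by rw [dpList_length arr k arr.length]; omega)
  have harg : ((arr.length : Int)) - (arr.length : Int) + ((0:Nat) : Int) = 0 := by
    push_cast; ring
  rw [show ((arr.length : Int) - (arr.length : Nat) + ((0:Nat) : Int)) = (0:Int) from harg] at h0
  rw [hA, List.headD_eq_head?, List.head?_eq_getElem?, h0]
  rfl
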